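-- pv_equiv track=rewrite | github.com/wenbo5565/Route_Optimization_for_Multiple_Searchers | camouflage_BSCA_T_Newformula45SameDetectionRate.py | is_searcher_occ
-- ===== SOURCE A (Python) =====
-- def return_nearby_cell(c, grid_size):
--     """ return nearby cells given a cell and grid_size """
--     stay = c
--     up = (c[0] - 1, c[1]) if (c[0] - 1) >= 1 else None
--     down = (c[0] + 1, c[1]) if (c[0] + 1) <= grid_size else None
--     left = (c[0], c[1] - 1) if (c[1] - 1) >= 1 else None
--     right = (c[0], c[1] + 1) if (c[1] + 1) <= grid_size else None
--     nearby =  [stay, up, down, left, right]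
--     return [direction for direction in nearby if direction != None]
--
-- def is_searcher_occ(C, T, grid_size):
--     searcher_occ = {}
--     for t in T:
--         for c in C:
--             # when t = 1, searcher can only occupy (1, 1), (1, 2) and (2, 1) because searchers are at (1, 1) at time 0
--             if t == 1:
--                 nearby_cell = return_nearby_cell((4, 1), grid_size)
--                 for each in nearby_cell:
--                     searcher_occ[each, 1] = 1
--             # return searcher_occ
--             else:
--                 already_occ = list(searcher_occ.keys())
--                 last_iter_occ = [c_t for c_t in already_occ if c_t[1] == t - 1] # check where the searcher could be at (t - 1)
--                 for c_t in last_iter_occ: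
--                     # if c_t[1] == t - 1:
--                     nearby_cell = return_nearby_cell(c_t[0], grid_size)
--                     for each in nearby_cell:
--                         searcher_occ[each, t] = 1
--     return searcher_occ
-- ===== SOURCE B (Python) =====
-- def return_nearby_cell(c, grid_size):
--     """ return nearby cells given a cell and grid_size """
--     stay = c
--     up = (c[0] - 1, c[1]) if (c[0] - 1) >= 1 else None
--     down = (c[0] + 1, c[1]) if (c[0] + 1) <= grid_size else None
--     left = (c[0], c[1] - 1) if (c[1] - 1) >= 1 else None
--     right = (c[0], c[1] + 1) if (c[1] + 1) <= grid_size else None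
--     nearby = [stay, up, down, left, right]
--     return [d for d in nearby if d is not None]
--
-- def is_searcher_occ(C, T, grid_size):
--     occ = {}
--     # A consumes C only as an (idempotent) repetition of the same update: empty C means no updates at all
--     if not C:
--         return occ
--     frontier = {}  # time -> ordered list of distinct cells first reached at that time
--     for t in T:
--         if t == 1:
--             cells = return_nearby_cell((4, 1), grid_size)
--         else:
--             cells = [nb for c in frontier.get(t - 1, []) for nb in return_nearby_cell(c, grid_size)]
--         for cell in cells:
--             if (cell, t) not in occ:
--                 occ[cell, t] = 1
--                 frontier.setdefault(t, []).append(cell)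
--     return occ
-- ===== Notes on version B (the rewrite author's own statement) =====
-- stated objective: faster
-- what changed: B drops the redundant loop over C (whose repeated body is idempotent; only C's emptiness matters) and maintains a per-time frontier list of newly reached cells, expanding only the frontier of t-1 instead of rescanning all accumulated dict keys at every step.
import Mathlib
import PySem

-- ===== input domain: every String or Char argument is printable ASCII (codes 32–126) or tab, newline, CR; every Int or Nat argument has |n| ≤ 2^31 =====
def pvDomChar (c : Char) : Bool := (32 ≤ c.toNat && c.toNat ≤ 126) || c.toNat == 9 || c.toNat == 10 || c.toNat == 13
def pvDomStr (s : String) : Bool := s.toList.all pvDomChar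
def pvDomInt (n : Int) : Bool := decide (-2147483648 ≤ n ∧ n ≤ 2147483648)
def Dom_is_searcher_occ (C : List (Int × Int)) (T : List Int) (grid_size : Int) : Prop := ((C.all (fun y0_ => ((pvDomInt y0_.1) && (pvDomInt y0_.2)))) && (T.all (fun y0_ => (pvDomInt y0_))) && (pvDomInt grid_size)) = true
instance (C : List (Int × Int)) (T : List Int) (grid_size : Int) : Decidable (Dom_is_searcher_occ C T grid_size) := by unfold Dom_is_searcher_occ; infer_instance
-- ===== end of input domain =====

-- B drops A's redundant loop over C (its body is idempotent; only C's emptiness matters) and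
-- expands a per-time frontier of newly reached cells instead of rescanning all dict keys: faster.

-- ===== PORT A =====
def return_nearby_cell (c : Int × Int) (grid_size : Int) : List (Int × Int) :=
  let stay : Option (Int × Int) := some c
  let up : Option (Int × Int) := if c.1 - 1 ≥ 1 then some (c.1 - 1, c.2) else none
  let down : Option (Int × Int) := if c.1 + 1 ≤ grid_size then some (c.1 + 1, c.2) else none
  let left : Option (Int × Int) := if c.2 - 1 ≥ 1 then some (c.1, c.2 - 1) else none
  let right : Option (Int × Int) := if c.2 + 1 ≤ grid_size then some (c.1, c.2 + 1) else none
  ([stay, up, down, left, right]).filterMap id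

def stepA (grid_size : Int) (d : PySem.Dict ((Int × Int) × Int) Int) (t : Int) :
    PySem.Dict ((Int × Int) × Int) Int :=
  if t == 1 then
    (return_nearby_cell (4, 1) grid_size).foldl (fun d each => d.insert (each, 1) 1) d
  else
    let already_occ := d.keys
    let last_iter_occ := already_occ.filter (fun c_t => c_t.2 == t - 1)
    last_iter_occ.foldl
      (fun d c_t => (return_nearby_cell c_t.1 grid_size).foldl (fun d each => d.insert (each, t) 1) d) d

def is_searcher_occ (C : List (Int × Int)) (T : List Int) (grid_size : Int) : List ((Int × Int) × Int × Int) :=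
  ((T.foldl (fun d t => C.foldl (fun d _c => stepA grid_size d t) d) PySem.Dict.empty).items).map
    (fun p => (p.1.1, p.1.2, p.2))

-- ===== PORT B =====
def stepB (grid_size : Int)
    (st : PySem.Dict ((Int × Int) × Int) Int × PySem.Dict Int (List (Int × Int))) (t : Int) :
    PySem.Dict ((Int × Int) × Int) Int × PySem.Dict Int (List (Int × Int)) :=
  let cells :=
    if t == 1 then return_nearby_cell (4, 1) grid_size
    else (st.2.getD (t - 1) []).flatMap (fun c => return_nearby_cell c grid_size)
  cells.foldl
    (fun st cell =>
      if st.1.contains (cell, t) then st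
      else (st.1.insert (cell, t) 1, st.2.modify t [] (fun l => l ++ [cell]))) st

def is_searcher_occ_alt (C : List (Int × Int)) (T : List Int) (grid_size : Int) : List ((Int × Int) × Int × Int) :=
  if C = [] then []
  else
    ((T.foldl (stepB grid_size) (PySem.Dict.empty, PySem.Dict.empty)).1.items).map
      (fun p => (p.1.1, p.1.2, p.2))

-- ===== PRECONDITION & SPEC =====
def Spec_is_searcher_occ (C : List (Int × Int)) (T : List Int) (grid_size : Int) (out : List ((Int × Int) × Int × Int)) : Prop := out = is_searcher_occ_alt C T grid_size
instance (C : List (Int × Int)) (T : List Int) (grid_size : Int) (out : List ((Int × Int) × Int × Int)) : Decidable (Spec_is_searcher_occ C T grid_size out) := by unfold Spec_is_searcher_occ; infer_instance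

-- ===== CLAIM (what is proved, stated in full; the proofs are below) =====
def Claim_equal_is_searcher_occ : Prop := ∀ (C : List (Int × Int)) (T : List Int) (grid_size : Int), Dom_is_searcher_occ C T grid_size → Spec_is_searcher_occ C T grid_size (is_searcher_occ C T grid_size)

-- ===== LEMMAS AND PROOFS =====

-- insAll t l d inserts (e, t) ↦ 1 for each e in l: the common core of both step functions
def insAll (t : Int) (l : List (Int × Int)) (d : PySem.Dict ((Int × Int) × Int) Int) :
    PySem.Dict ((Int × Int) × Int) Int :=
  l.foldl (fun d each => d.insert (each, t) 1) d

def cellsOf (grid_size t : Int) (d : PySem.Dict ((Int × Int) × Int) Int) : List (Int × Int) :=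
  if t == 1 then return_nearby_cell (4, 1) grid_size
  else (d.keys.filter (fun k => k.2 == t - 1)).flatMap (fun c_t => return_nearby_cell c_t.1 grid_size)

-- the coupling invariant between A's dict and B's (dict, frontier) state
def InvAB (d : PySem.Dict ((Int × Int) × Int) Int) (f : PySem.Dict Int (List (Int × Int))) : Prop :=
  (∀ p ∈ d.items, p.2 = (1 : Int)) ∧ d.keys.Nodup ∧
  ∀ t' : Int, f.getD t' [] = (d.keys.filter (fun k => k.2 == t')).map (fun k => k.1)

theorem insert_eq_self {κ ν : Type} [BEq κ] [LawfulBEq κ] (d : PySem.Dict κ ν) (k : κ) (v : ν)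
    (hnd : d.keys.Nodup) (h : d.get? k = some v) : d.insert k v = d := by
  apply PySem.Dict.ext
  have hc : d.contains k = true := by
    rw [PySem.Dict.contains_eq_isSome_get?, h]; rfl
  rw [PySem.Dict.items_insert_of_contains d v hc]
  conv_rhs => rw [← List.map_id d.items]
  apply List.map_congr_left
  intro p hp
  by_cases hk : p.1 == k
  · have hk' : p.1 = k := by simpa using hk
    have hg : d.get? p.1 = some p.2 := PySem.Dict.get?_of_mem_items d hp hnd
    rw [hk', h] at hg
    simp only [hk, if_true, id]
    obtain ⟨p1, p2⟩ := p
    simp only at hk' hg ⊢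
    simp [hk', (Option.some.injEq _ _).mp hg]
  · simp [hk]

theorem get?_insAll (t : Int) (l : List (Int × Int)) (d : PySem.Dict ((Int × Int) × Int) Int)
    (k : (Int × Int) × Int) :
    (insAll t l d).get? k = if k.2 = t ∧ k.1 ∈ l then some 1 else d.get? k := by
  induction l generalizing d with
  | nil => simp [insAll]
  | cons a l ih =>
    simp only [insAll, List.foldl_cons] at ih ⊢
    rw [ih, PySem.Dict.get?_insert]
    obtain ⟨k1, k2⟩ := k
    by_cases h2 : k2 = t
    · by_cases hm : k1 ∈ l
      · simp [h2, hm]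
      · by_cases ha : k1 = a
        · simp [h2, ha]
        · have hne : ((k1, k2) : (Int × Int) × Int) ≠ (a, t) := by
            intro hh; exact ha (congrArg Prod.fst hh)
          simp [h2, hm, hne]
    · have hne : ((k1, k2) : (Int × Int) × Int) ≠ (a, t) := by
        intro hh; exact h2 (congrArg Prod.snd hh)
      simp [h2, hne]

theorem keys_insAll (t : Int) (l : List (Int × Int)) (d : PySem.Dict ((Int × Int) × Int) Int) :
    (insAll t l d).keys = PySem.Set.update d.keys (l.map (fun e => (e, t))) :=
  PySem.Dict.keys_foldl_insert_key l (fun e => (e, t)) (fun _ _ => 1) d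

theorem nodup_insAll (t : Int) (l : List (Int × Int)) (d : PySem.Dict ((Int × Int) × Int) Int)
    (h : d.keys.Nodup) : (insAll t l d).keys.Nodup :=
  PySem.Dict.nodup_keys_foldl_insert_key l (fun e => (e, t)) (fun _ _ => 1) d h

theorem filter_keys_insAll (t t' : Int) (l : List (Int × Int))
    (d : PySem.Dict ((Int × Int) × Int) Int) (ht : t' ≠ t) :
    (insAll t l d).keys.filter (fun k => k.2 == t') = d.keys.filter (fun k => k.2 == t') := by
  rw [keys_insAll, PySem.Set.update_eq_append_filter, List.filter_append]
  have hnil : (((PySem.Set.ofList (l.map (fun e => (e, t)))).filter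
      (fun y => !(PySem.Set.contains d.keys y))).filter (fun k => k.2 == t')) = [] := by
    apply List.filter_eq_nil_iff.mpr
    intro k hk
    have hk1 := List.mem_of_mem_filter hk
    have hk2 : k ∈ l.map (fun e => (e, t)) := (PySem.Set.mem_ofList _ _).mp hk1
    obtain ⟨e, _, rfl⟩ := List.mem_map.mp hk2
    simp [Ne.symm ht]
  rw [hnil, List.append_nil]

theorem insAll_of_present (t : Int) (l : List (Int × Int)) (d : PySem.Dict ((Int × Int) × Int) Int)
    (hnd : d.keys.Nodup) (h : ∀ e ∈ l, d.get? (e, t) = some 1) : insAll t l d = d := by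
  induction l generalizing d with
  | nil => rfl
  | cons a l ih =>
    simp only [insAll, List.foldl_cons] at ih ⊢
    rw [insert_eq_self d (a, t) 1 hnd (h a (by simp))]
    exact ih d hnd (fun e he => h e (by simp [he]))

theorem foldl_insAll_flatMap (gs t : Int) (last : List ((Int × Int) × Int))
    (d : PySem.Dict ((Int × Int) × Int) Int) :
    last.foldl (fun d c_t => (return_nearby_cell c_t.1 gs).foldl (fun d each => d.insert (each, t) 1) d) d
      = insAll t (last.flatMap (fun c_t => return_nearby_cell c_t.1 gs)) d := by
  induction last generalizing d with
  | nil => rfl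
  | cons a l ih =>
    simp only [List.foldl_cons, List.flatMap_cons]
    rw [ih]
    simp [insAll, List.foldl_append]

theorem stepA_eq (gs : Int) (d : PySem.Dict ((Int × Int) × Int) Int) (t : Int) :
    stepA gs d t = insAll t (cellsOf gs t d) d := by
  unfold stepA cellsOf
  by_cases h : t == 1
  · have ht : t = 1 := by simpa using h
    subst ht
    simp only [h, if_true]
    rfl
  · simp only [h, Bool.false_eq_true, if_false]
    exact foldl_insAll_flatMap gs t _ d

theorem cellsOf_insAll (gs t : Int) (l : List (Int × Int))
    (d : PySem.Dict ((Int × Int) × Int) Int) :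
    cellsOf gs t (insAll t l d) = cellsOf gs t d := by
  unfold cellsOf
  by_cases h : t == 1
  · simp [h]
  · simp only [h, Bool.false_eq_true, if_false]
    rw [filter_keys_insAll t (t - 1) l d (by omega)]

theorem stepA_idem (gs : Int) (d : PySem.Dict ((Int × Int) × Int) Int) (t : Int)
    (hnd : d.keys.Nodup) : stepA gs (stepA gs d t) t = stepA gs d t := by
  rw [stepA_eq, stepA_eq gs d t, cellsOf_insAll]
  apply insAll_of_present _ _ _ (nodup_insAll _ _ _ hnd)
  intro e he
  rw [get?_insAll]
  simp [he]

theorem cfold_aux (gs t : Int) (cs : List (Int × Int)) :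
    ∀ d : PySem.Dict ((Int × Int) × Int) Int, d.keys.Nodup →
      cs.foldl (fun d _ => stepA gs d t) (stepA gs d t) = stepA gs d t := by
  induction cs with
  | nil => intro d _; rfl
  | cons c cs ih =>
    intro d hnd
    simp only [List.foldl_cons]
    rw [stepA_idem gs d t hnd]
    exact ih d hnd

theorem cfold_stepA (gs t : Int) (C : List (Int × Int)) (d : PySem.Dict ((Int × Int) × Int) Int)
    (hC : C ≠ []) (hnd : d.keys.Nodup) :
    C.foldl (fun d _c => stepA gs d t) d = stepA gs d t := by
  obtain ⟨c, cs, rfl⟩ := List.exists_cons_of_ne_nil hC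
  simp only [List.foldl_cons]
  exact cfold_aux gs t cs d hnd

theorem condFold_eq (t : Int) (cells : List (Int × Int))
    (d : PySem.Dict ((Int × Int) × Int) Int) (f : PySem.Dict Int (List (Int × Int)))
    (h : InvAB d f) :
    (cells.foldl (fun st cell =>
        if st.1.contains (cell, t) then st
        else (st.1.insert (cell, t) 1, st.2.modify t [] (fun l => l ++ [cell]))) (d, f)).1
      = insAll t cells d ∧
    InvAB (cells.foldl (fun st cell =>
        if st.1.contains (cell, t) then st
        else (st.1.insert (cell, t) 1, st.2.modify t [] (fun l => l ++ [cell]))) (d, f)).1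
        (cells.foldl (fun st cell =>
        if st.1.contains (cell, t) then st
        else (st.1.insert (cell, t) 1, st.2.modify t [] (fun l => l ++ [cell]))) (d, f)).2 := by
  induction cells generalizing d f with
  | nil => exact ⟨rfl, h⟩
  | cons c cells ih =>
    obtain ⟨h1, h2, h3⟩ := h
    simp only [List.foldl_cons, insAll, List.foldl_cons] at ih ⊢
    by_cases hc : d.contains (c, t) = true
    · have hins : d.insert (c, t) 1 = d := by
        have hs : (d.get? (c, t)).isSome := by rw [← PySem.Dict.contains_eq_isSome_get?, hc]
        obtain ⟨v, hv⟩ := Option.isSome_iff_exists.mp hs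
        have hv1 : v = 1 := h1 _ (PySem.Dict.mem_items_of_get?_eq_some d hv)
        rw [← hv1]
        exact insert_eq_self d (c, t) v h2 hv
      simp only [hc, if_true]
      have := ih d f ⟨h1, h2, h3⟩
      rw [hins]
      exact this
    · simp only [hc, if_false]
      have hcf : d.contains (c, t) = false := by simpa using hc
      have hkeys : (d.insert (c, t) 1).keys = d.keys ++ [(c, t)] :=
        PySem.Dict.keys_insert_of_not_contains _ _ hcf
      apply ih
      refine ⟨?_, ?_, ?_⟩
      · intro p hp
        rcases (PySem.Dict.mem_items_insert _ _ _ _).mp hp with hh | ⟨hh, _⟩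
        · rw [hh]
        · exact h1 p hh
      · exact PySem.Dict.nodup_keys_insert _ _ _ h2
      · intro t'
        rw [PySem.Dict.getD_modify, hkeys, List.filter_append, List.map_append]
        by_cases ht : t' = t
        · subst ht
          simp [h3 t']
        · have hbe : ((t : Int) == t') = false := beq_eq_false_iff_ne.mpr (Ne.symm ht)
          simp [ht, h3 t', hbe]

theorem main_fold (gs : Int) (C : List (Int × Int)) (hC : C ≠ []) (T : List Int) :
    ∀ (d : PySem.Dict ((Int × Int) × Int) Int) (f : PySem.Dict Int (List (Int × Int))),
      InvAB d f →
      T.foldl (fun d t => C.foldl (fun d _c => stepA gs d t) d) d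
        = (T.foldl (stepB gs) (d, f)).1 ∧
      InvAB (T.foldl (stepB gs) (d, f)).1 (T.foldl (stepB gs) (d, f)).2 := by
  induction T with
  | nil => intro d f h; exact ⟨rfl, h⟩
  | cons t T ih =>
    intro d f h
    obtain ⟨h1, h2, h3⟩ := h
    simp only [List.foldl_cons]
    rw [cfold_stepA gs t C d hC h2]
    have hcells : (if t == 1 then return_nearby_cell (4, 1) gs
        else (f.getD (t - 1) []).flatMap (fun c => return_nearby_cell c gs)) = cellsOf gs t d := by
      unfold cellsOf
      by_cases ht : t == 1
      · simp [ht]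
      · simp only [ht, if_false]
        rw [h3 (t - 1), List.flatMap_map]
    have hstep : stepB gs (d, f) t
        = ((cellsOf gs t d).foldl (fun st cell =>
            if st.1.contains (cell, t) then st
            else (st.1.insert (cell, t) 1, st.2.modify t [] (fun l => l ++ [cell]))) (d, f)) := by
      unfold stepB
      rw [hcells]
    have hcf := condFold_eq t (cellsOf gs t d) d f ⟨h1, h2, h3⟩
    rw [hstep]
    rw [stepA_eq, ← hcf.1]
    exact ih _ _ hcf.2

theorem foldl_const_id (T : List Int) (d : PySem.Dict ((Int × Int) × Int) Int) :
    T.foldl (fun d (_ : Int) => d) d = d := by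
  induction T generalizing d with
  | nil => rfl
  | cons t T ih => simpa using ih d

-- ===== VERDICT (by name: the statement is the Claim_ definition above) =====
theorem is_searcher_occ_spec : Claim_equal_is_searcher_occ := by
  intro C T gs _dom
  unfold Spec_is_searcher_occ is_searcher_occ is_searcher_occ_alt
  by_cases hC : C = []
  · subst hC
    rw [if_pos rfl]
    rw [show (fun (d : PySem.Dict ((Int × Int) × Int) Int) (t : Int) =>
        List.foldl (fun d (_c : Int × Int) => stepA gs d t) d ([] : List (Int × Int)))
        = fun d (_ : Int) => d from rfl]
    rw [foldl_const_id]
    rfl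
  · rw [if_neg hC]
    have hinv : InvAB PySem.Dict.empty PySem.Dict.empty := by
      refine ⟨?_, ?_, ?_⟩
      · intro p hp; simp [PySem.Dict.empty] at hp
      · exact PySem.Dict.nodup_keys_empty
      · intro t'
        simp [PySem.Dict.empty, PySem.Dict.getD, PySem.Dict.get?, PySem.Dict.keys]
    rw [(main_fold gs C hC T PySem.Dict.empty PySem.Dict.empty hinv).1]
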